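-- pv_equiv track=rewrite | github.com/melek/stepwise | lib/postconditions.py | check_all_candidates_screened
-- ===== SOURCE A (Python) =====
-- def _result(failures: list[str]) -> tuple[bool, list[str]]:
--     return (len(failures) == 0, failures)
--
-- def check_all_candidates_screened(
--     candidates: list[dict], screening_log: list[dict]
-- ) -> tuple[bool, list[str]]:
--     """Every candidate has a final include/exclude decision in screening_log."""
--     final_decisions: set[str] = set()
--     for entry in screening_log:
--         if entry.get("decision") in ("include", "exclude"):
--             final_decisions.add(entry["paper_id"])
--     failures = []
--     for c in candidates:
--         if c["id"] not in final_decisions: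
--             failures.append(f"Candidate {c['id']} has no final screening decision")
--     return _result(failures)
-- ===== SOURCE B (Python) =====
-- def check_all_candidates_screened(
--     candidates: list[dict], screening_log: list[dict]
-- ) -> tuple[bool, list[str]]:
--     """Every candidate has a final include/exclude decision in screening_log."""
--     failures = []
--     for c in candidates:
--         cid = c["id"]
--         screened = any(
--             e.get("decision") in ("include", "exclude") and e.get("paper_id") == cid
--             for e in screening_log
--         )
--         if not screened:
--             failures.append(f"Candidate {cid} has no final screening decision")
--     return (len(failures) == 0, failures)
-- ===== Notes on version B (the rewrite author's own statement) =====
-- stated objective: simpler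
-- what changed: Drops the precomputed set of final decisions: B scans screening_log inline per candidate with any(), so no intermediate set is built or maintained.
import Mathlib
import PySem

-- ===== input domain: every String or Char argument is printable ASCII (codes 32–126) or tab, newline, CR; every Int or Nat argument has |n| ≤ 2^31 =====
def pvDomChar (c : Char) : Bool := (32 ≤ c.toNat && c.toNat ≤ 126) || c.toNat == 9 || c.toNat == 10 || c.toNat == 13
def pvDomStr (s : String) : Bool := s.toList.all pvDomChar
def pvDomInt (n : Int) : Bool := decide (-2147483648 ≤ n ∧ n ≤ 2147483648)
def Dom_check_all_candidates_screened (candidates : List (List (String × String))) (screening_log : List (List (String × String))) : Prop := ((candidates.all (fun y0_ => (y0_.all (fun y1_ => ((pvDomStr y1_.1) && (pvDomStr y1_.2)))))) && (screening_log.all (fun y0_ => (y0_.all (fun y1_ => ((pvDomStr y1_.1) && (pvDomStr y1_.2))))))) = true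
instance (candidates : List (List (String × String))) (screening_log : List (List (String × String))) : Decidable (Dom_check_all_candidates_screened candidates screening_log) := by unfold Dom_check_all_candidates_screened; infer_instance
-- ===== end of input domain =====

-- B replaces A's precomputed set of final decisions by a per-candidate inline any() scan
-- of screening_log (simpler: no intermediate set is built or maintained).

-- ===== PORT A =====
-- entry.get("decision"): total dict lookup (None-returning), exact.
def pvGetA (e : List (String × String)) (k : String) : Option String :=
  (PySem.Dict.mk e).get? k

-- entry["paper_id"] / c["id"]: raising lookup; total via getD "" ONLY under
-- Pre_check_all_candidates_screened (the key is present there; none = KeyError is excluded by Pre_).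
def pvIdxA (e : List (String × String)) (k : String) : String :=
  (pvGetA e k).getD ""

def pvResult (failures : List String) : Bool × List String :=
  (failures.length == 0, failures)

def check_all_candidates_screened (candidates : List (List (String × String))) (screening_log : List (List (String × String))) : Bool × List String :=
  let final_decisions : PySem.Set String :=
    screening_log.foldl (fun s entry =>
      if pvGetA entry "decision" = some "include" ∨ pvGetA entry "decision" = some "exclude" then
        PySem.Set.add s (pvIdxA entry "paper_id")
      else s) PySem.Set.empty
  let failures : List String :=
    candidates.foldl (fun fs c =>
      if ¬ (final_decisions.contains (pvIdxA c "id")) then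
        fs ++ ["Candidate " ++ pvIdxA c "id" ++ " has no final screening decision"]
      else fs) []
  pvResult failures

-- ===== PORT B =====
def check_all_candidates_screened_alt (candidates : List (List (String × String))) (screening_log : List (List (String × String))) : Bool × List String :=
  let failures : List String :=
    candidates.foldl (fun fs c =>
      let cid := pvIdxA c "id"
      let screened := screening_log.any (fun e =>
        ((pvGetA e "decision" = some "include" ∨ pvGetA e "decision" = some "exclude") ∧
          pvGetA e "paper_id" = some cid : Prop))
      if ¬ screened then
        fs ++ ["Candidate " ++ cid ++ " has no final screening decision"]
      else fs) []
  (failures.length == 0, failures)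

-- ===== PRECONDITION & SPEC =====
-- Pre_ excludes exactly the inputs on which Python A raises KeyError: a screening_log
-- entry with a final decision but no "paper_id" key, or a candidate with no "id" key.
def Pre_check_all_candidates_screened (candidates : List (List (String × String))) (screening_log : List (List (String × String))) : Prop :=
  (∀ e ∈ screening_log,
      (pvGetA e "decision" = some "include" ∨ pvGetA e "decision" = some "exclude") →
      (pvGetA e "paper_id").isSome) ∧
  (∀ c ∈ candidates, (pvGetA c "id").isSome)
instance (candidates : List (List (String × String))) (screening_log : List (List (String × String))) : Decidable (Pre_check_all_candidates_screened candidates screening_log) := by unfold Pre_check_all_candidates_screened; infer_instance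

def pvWitness_check_all_candidates_screened : (List (List (String × String))) × (List (List (String × String))) :=
  ([[("id", "p1")], [("id", "p2")]],
   [[("paper_id", "p1"), ("decision", "include")], [("paper_id", "p3"), ("decision", "maybe")]])

def Spec_check_all_candidates_screened (candidates : List (List (String × String))) (screening_log : List (List (String × String))) (out : Bool × List String) : Prop := out = check_all_candidates_screened_alt candidates screening_log
instance (candidates : List (List (String × String))) (screening_log : List (List (String × String))) (out : Bool × List String) : Decidable (Spec_check_all_candidates_screened candidates screening_log out) := by unfold Spec_check_all_candidates_screened; infer_instance

-- ===== CLAIM (what is proved, stated in full; the proofs are below) =====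
def Claim_equal_check_all_candidates_screened : Prop := ∀ (candidates : List (List (String × String))) (screening_log : List (List (String × String))), Dom_check_all_candidates_screened candidates screening_log → Pre_check_all_candidates_screened candidates screening_log → Spec_check_all_candidates_screened candidates screening_log (check_all_candidates_screened candidates screening_log)
-- ===== LEMMAS AND PROOFS =====

-- A's membership test in the accumulated set equals B's inline any-scan (under Pre_'s
-- log condition), stated for an arbitrary accumulator set.
lemma finals_contains (log : List (List (String × String))) (cid : String)
    (h : ∀ e ∈ log,
      (pvGetA e "decision" = some "include" ∨ pvGetA e "decision" = some "exclude") →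
      (pvGetA e "paper_id").isSome) :
    ∀ s : PySem.Set String,
      (log.foldl (fun s entry =>
        if pvGetA entry "decision" = some "include" ∨ pvGetA entry "decision" = some "exclude" then
          PySem.Set.add s (pvIdxA entry "paper_id")
        else s) s).contains cid =
      (s.contains cid ||
        log.any (fun e =>
          ((pvGetA e "decision" = some "include" ∨ pvGetA e "decision" = some "exclude") ∧
            pvGetA e "paper_id" = some cid : Prop))) := by
  induction log with
  | nil => intro s; simp
  | cons e rest ih =>
    intro s
    have he := h e (by simp)
    have hrest : ∀ e' ∈ rest, _ := fun e' hm => h e' (by simp [hm])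
    simp only [List.foldl_cons, List.any_cons]
    rw [ih hrest]
    by_cases hd : pvGetA e "decision" = some "include" ∨ pvGetA e "decision" = some "exclude"
    · obtain ⟨pid, hpid⟩ := Option.isSome_iff_exists.mp (he hd)
      simp only [hd, if_pos, hpid, pvIdxA, Option.getD_some,
        PySem.Set.contains_eq_listContains, List.contains_eq_mem]
      simp [PySem.Set.mem_add, Bool.or_assoc, eq_comm]
    · simp [hd]

theorem check_all_candidates_screened_spec : Claim_equal_check_all_candidates_screened := by
  intro candidates screening_log hdom hpre
  clear hdom
  unfold Spec_check_all_candidates_screened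
  unfold check_all_candidates_screened check_all_candidates_screened_alt pvResult
  obtain ⟨hlog, hcand⟩ := hpre
  clear hcand
  suffices h : ∀ fs : List String,
      candidates.foldl (fun fs c =>
        if ¬ ((screening_log.foldl (fun s entry =>
            if pvGetA entry "decision" = some "include" ∨ pvGetA entry "decision" = some "exclude" then
              PySem.Set.add s (pvIdxA entry "paper_id")
            else s) PySem.Set.empty).contains (pvIdxA c "id")) then
          fs ++ ["Candidate " ++ pvIdxA c "id" ++ " has no final screening decision"]
        else fs) fs =
      candidates.foldl (fun fs c =>
        if ¬ (screening_log.any (fun e =>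
            ((pvGetA e "decision" = some "include" ∨ pvGetA e "decision" = some "exclude") ∧
              pvGetA e "paper_id" = some (pvIdxA c "id") : Prop))) then
          fs ++ ["Candidate " ++ pvIdxA c "id" ++ " has no final screening decision"]
        else fs) fs by
    simp only [h]
  intro fs
  induction candidates generalizing fs with
  | nil => rfl
  | cons c rest ih =>
    simp only [List.foldl_cons]
    rw [finals_contains screening_log (pvIdxA c "id") hlog PySem.Set.empty]
    have hemp : (PySem.Set.empty : PySem.Set String).contains (pvIdxA c "id") = false := rfl
    rw [hemp, Bool.false_or]
    apply ih
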